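-- pv_equiv track=rewrite | github.com/freedan42x/katas | python/6 kyu - World Bits War.py | bits_war
-- ===== SOURCE A (Python) =====
-- def strength(num):
--     return -strength(-num) if num < 0 else bin(num).count('1')
--
-- def bits_war(numbers):
--     odds = 0
--     evens = 0
--     for num in numbers:
--         if num == 0: continue
--         if num & 1:
--             odds += strength(num)
--         else:
--             evens += strength(num)
--
--     if odds == evens: return 'tie'
--     if odds > evens: return 'odds win'
--     return 'evens win'
-- ===== SOURCE B (Python) =====
-- def bits_war(numbers):
--     # Bit-plane sweep: instead of popcounting each number, scan the 32 bit
--     # positions (|n| <= 2**31 on the stated domain) and add each number's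
--     # signed parity weight once per set bit; the winner is the sign of the total.
--     total = 0
--     for k in range(32):
--         for num in numbers:
--             if (abs(num) >> k) & 1:
--                 w = 1 if num % 2 else -1
--                 if num < 0:
--                     w = -w
--                 total += w
--     if total > 0:
--         return 'odds win'
--     if total < 0:
--         return 'evens win'
--     return 'tie'
-- ===== Notes on version B (the rewrite author's own statement) =====
-- stated objective: alternative
-- what changed: Replaces the per-number recursive popcount (bin().count('1')) with a transposed bit-plane sweep: an outer loop over the 32 bit positions adds each number's signed parity weight once per set bit of |num| into one running total, and the winner is read off the total's sign; correct because summing indicator bits over positions 0..31 equals the popcount for |n| <= 2^31.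
import Mathlib
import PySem

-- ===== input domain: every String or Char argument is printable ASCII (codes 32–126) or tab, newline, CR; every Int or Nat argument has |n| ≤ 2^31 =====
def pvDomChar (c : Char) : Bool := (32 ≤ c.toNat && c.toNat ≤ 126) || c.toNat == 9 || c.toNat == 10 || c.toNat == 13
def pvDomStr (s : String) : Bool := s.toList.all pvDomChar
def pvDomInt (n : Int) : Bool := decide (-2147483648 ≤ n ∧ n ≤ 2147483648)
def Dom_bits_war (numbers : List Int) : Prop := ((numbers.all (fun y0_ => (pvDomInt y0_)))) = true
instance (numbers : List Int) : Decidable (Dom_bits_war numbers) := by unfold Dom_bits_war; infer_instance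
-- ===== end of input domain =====

-- B replaces A's per-number recursive popcount and odds/evens accumulators with a
-- transposed bit-plane sweep over the 32 bit positions (valid since |n| <= 2^31 on Dom),
-- accumulating one signed total whose sign decides the winner.


-- ===== PORT A =====
-- bin(num).count('1') for num ≥ 0: ported by hand as the count of 1 digits of n in binary (exact: bin() has no '1' outside the digits)
def binOnes (n : Nat) : Nat :=
  if n = 0 then 0 else binOnes (n / 2) + n % 2
decreasing_by exact Nat.div_lt_self (Nat.pos_of_ne_zero (by assumption)) (by omega)

def strengthA (num : Int) : Int :=
  if num < 0 then -strengthA (-num) else (binOnes num.toNat : Int)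
termination_by (if num < 0 then 1 else 0)
decreasing_by simp_all; omega

def bits_war (numbers : List Int) : String :=
  let p := numbers.foldl
    (fun (s : Int × Int) num =>
      if num = 0 then s
      else if PySem.Int.band num 1 ≠ 0 then (s.1 + strengthA num, s.2)
      else (s.1, s.2 + strengthA num)) (0, 0)
  if p.1 = p.2 then "tie"
  else if p.1 > p.2 then "odds win"
  else "evens win"

-- ===== PORT B =====
def bits_war_alt (numbers : List Int) : String :=
  let t := (PySem.List.pyRange 0 32 1).foldl
    (fun (t : Int) k =>
      numbers.foldl
        (fun (t : Int) num =>
          if (num.natAbs >>> k.toNat) &&& 1 ≠ 0 then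
            let w : Int := if num % 2 ≠ 0 then 1 else -1
            let w := if num < 0 then -w else w
            t + w
          else t) t) 0
  if t > 0 then "odds win"
  else if t < 0 then "evens win"
  else "tie"

-- ===== PRECONDITION & SPEC =====
def Spec_bits_war (numbers : List Int) (out : String) : Prop := out = bits_war_alt numbers
instance (numbers : List Int) (out : String) : Decidable (Spec_bits_war numbers out) := by unfold Spec_bits_war; infer_instance

-- ===== CLAIM (what is proved, stated in full; the proofs are below) =====
def Claim_equal_bits_war : Prop := ∀ (numbers : List Int), Dom_bits_war numbers → Spec_bits_war numbers (bits_war numbers)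

-- ===== LEMMAS AND PROOFS =====

-- signed parity weight of a number (the w of B's inner loop)
def wgt (num : Int) : Int :=
  if num < 0 then -(if num % 2 ≠ 0 then 1 else -1) else (if num % 2 ≠ 0 then 1 else -1)

-- contribution of number num at bit plane k (B's inner-loop increment)
def bitc (k : Nat) (num : Int) : Int :=
  if (num.natAbs >>> k) &&& 1 ≠ 0 then wgt num else 0

theorem inner_fold (numbers : List Int) (k : Int) (t : Int) :
    numbers.foldl
      (fun (t : Int) num =>
        if (num.natAbs >>> k.toNat) &&& 1 ≠ 0 then
          let w : Int := if num % 2 ≠ 0 then 1 else -1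
          let w := if num < 0 then -w else w
          t + w
        else t) t
    = t + (numbers.map (bitc k.toNat)).sum := by
  induction numbers generalizing t with
  | nil => simp
  | cons x xs ih =>
    simp only [List.foldl_cons, ih, List.map_cons, List.sum_cons]
    unfold bitc wgt
    split_ifs <;> ring

theorem outer_fold (ks : List Int) (numbers : List Int) (t : Int) :
    ks.foldl
      (fun (t : Int) k =>
        numbers.foldl
          (fun (t : Int) num =>
            if (num.natAbs >>> k.toNat) &&& 1 ≠ 0 then
              let w : Int := if num % 2 ≠ 0 then 1 else -1
              let w := if num < 0 then -w else w
              t + w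
            else t) t) t
    = t + (ks.map (fun k => (numbers.map (bitc k.toNat)).sum)).sum := by
  induction ks generalizing t with
  | nil => simp
  | cons k ks ih =>
    simp only [List.foldl_cons, List.map_cons, List.sum_cons]
    rw [inner_fold, ih]
    ring

-- double-sum swap
theorem sum_map_add {β : Type} (ns : List β) (f g : β → Int) :
    (ns.map (fun n => f n + g n)).sum = (ns.map f).sum + (ns.map g).sum := by
  induction ns with
  | nil => simp
  | cons n ns ih => simp only [List.map_cons, List.sum_cons, ih]; ring

theorem sum_swap_list {α β : Type} (ks : List α) (ns : List β) (f : α → β → Int) :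
    (ks.map (fun k => (ns.map (f k)).sum)).sum
      = (ns.map (fun n => (ks.map (fun k => f k n)).sum)).sum := by
  induction ks with
  | nil => simp
  | cons k ks ih =>
    simp only [List.map_cons, List.sum_cons, ih]
    rw [← sum_map_add ns (f k) (fun n => (ks.map (fun k => f k n)).sum)]

theorem binOnes_zero : binOnes 0 = 0 := by rw [binOnes]; simp

-- summing the bits at positions 0..B-1 recovers binOnes for n < 2^B
theorem sum_bits (B : Nat) : ∀ n : Nat, n < 2 ^ B →
    ((List.range B).map (fun k => if (n >>> k) &&& 1 ≠ 0 then (1 : Int) else 0)).sum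
      = (binOnes n : Int) := by
  induction B with
  | zero => intro n hn; interval_cases n; simp [binOnes_zero]
  | succ B ih =>
    intro n hn
    rw [List.range_succ_eq_map]
    simp only [List.map_cons, List.sum_cons, List.map_map]
    have h1 : ∀ k : Nat, (n >>> (k + 1)) = (n / 2) >>> k := by
      intro k
      rw [Nat.shiftRight_succ_inside]
    have hcomp :
        ((List.range B).map (fun k => if (n >>> (k + 1)) &&& 1 ≠ 0 then (1 : Int) else 0)).sum
          = (binOnes (n / 2) : Int) := by
      have := ih (n / 2) (by omega)
      rw [← this]
      congr 1
      apply List.map_congr_left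
      intro k _
      rw [h1 k]
    have hfun :
        ((List.range B).map ((fun k => if (n >>> k) &&& 1 ≠ 0 then (1 : Int) else 0) ∘ (fun i => i + 1)))
          = (List.range B).map (fun k => if (n >>> (k + 1)) &&& 1 ≠ 0 then (1 : Int) else 0) := by
      rfl
    rw [hfun, hcomp]
    have hbit0 : n >>> 0 &&& 1 = n % 2 := by
      simp [Nat.shiftRight_zero, Nat.and_one_is_mod]
    by_cases hz : n = 0
    · simp [hz, binOnes_zero]
    · have hb : binOnes n = binOnes (n / 2) + n % 2 := by
        rw [binOnes, if_neg hz]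
      rw [hb, hbit0]
      push_cast
      rcases Nat.mod_two_eq_zero_or_one n with h | h <;>
        · rw [h]; simp; omega

theorem sum_bitc (num : Int) (h : num.natAbs < 2 ^ 32) :
    ((List.range 32).map (fun k => bitc k num)).sum = wgt num * (binOnes num.natAbs : Int) := by
  have : ∀ k, bitc k num = wgt num * (if (num.natAbs >>> k) &&& 1 ≠ 0 then (1 : Int) else 0) := by
    intro k; unfold bitc; split_ifs <;> ring
  calc ((List.range 32).map (fun k => bitc k num)).sum
      = ((List.range 32).map (fun k => wgt num * (if (num.natAbs >>> k) &&& 1 ≠ 0 then (1 : Int) else 0))).sum := by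
        congr 1; exact List.map_congr_left (fun k _ => this k)
    _ = wgt num * ((List.range 32).map (fun k => if (num.natAbs >>> k) &&& 1 ≠ 0 then (1 : Int) else 0)).sum := by
        rw [List.sum_map_mul_left]
    _ = wgt num * (binOnes num.natAbs : Int) := by rw [sum_bits 32 num.natAbs h]

theorem int_and_one (n : Int) : PySem.Int.band n 1 = n % 2 := by
  cases n with
  | ofNat m => simp [PySem.Int.band]
  | negSucc m => simp [PySem.Int.band]; omega

theorem strengthA_eq (num : Int) :
    strengthA num = (if num < 0 then -(binOnes num.natAbs : Int) else (binOnes num.natAbs : Int)) := by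
  rw [strengthA]
  by_cases h : num < 0
  · rw [if_pos h, if_pos h, strengthA, if_neg (by omega)]
    have hh : (-num).toNat = num.natAbs := by omega
    rw [hh]
  · rw [if_neg h, if_neg h]
    have hh : num.toNat = num.natAbs := by omega
    rw [hh]

-- A's running pair, minus-wise, equals the sum of per-number signed contributions
theorem a_fold (numbers : List Int) (o e : Int) :
    (numbers.foldl
      (fun (s : Int × Int) num =>
        if num = 0 then s
        else if PySem.Int.band num 1 ≠ 0 then (s.1 + strengthA num, s.2)
        else (s.1, s.2 + strengthA num)) (o, e)).1
    - (numbers.foldl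
      (fun (s : Int × Int) num =>
        if num = 0 then s
        else if PySem.Int.band num 1 ≠ 0 then (s.1 + strengthA num, s.2)
        else (s.1, s.2 + strengthA num)) (o, e)).2
    = o - e + (numbers.map (fun num => wgt num * (binOnes num.natAbs : Int))).sum := by
  induction numbers generalizing o e with
  | nil => simp
  | cons x xs ih =>
    simp only [List.foldl_cons, List.map_cons, List.sum_cons]
    by_cases hz : x = 0
    · rw [if_pos hz, ih]
      subst hz
      simp [wgt, binOnes_zero]
    · rw [if_neg hz, int_and_one]
      by_cases hodd : x % 2 ≠ 0
      · rw [if_pos hodd, ih, strengthA_eq]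
        unfold wgt
        rw [if_pos hodd]
        split_ifs <;> ring
      · rw [if_neg hodd, ih, strengthA_eq]
        unfold wgt
        rw [if_neg hodd]
        split_ifs <;> ring

theorem pyRange32 : PySem.List.pyRange 0 32 1 = (List.range 32).map Int.ofNat := by decide

-- ===== VERDICT (by name: the statement is the Claim_ definition above) =====
theorem bits_war_spec : Claim_equal_bits_war := by
  intro numbers hdom
  unfold Spec_bits_war bits_war bits_war_alt
  dsimp only
  have hbound : ∀ num ∈ numbers, num.natAbs < 2 ^ 32 := by
    intro num hm
    have := List.all_eq_true.mp hdom num hm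
    simp only [pvDomInt, decide_eq_true_eq] at this
    omega
  have hB :
      ((PySem.List.pyRange 0 32 1).foldl
        (fun (t : Int) k =>
          numbers.foldl
            (fun (t : Int) num =>
              if (num.natAbs >>> k.toNat) &&& 1 ≠ 0 then
                let w : Int := if num % 2 ≠ 0 then 1 else -1
                let w := if num < 0 then -w else w
                t + w
              else t) t) 0)
        = (numbers.map (fun num => wgt num * (binOnes num.natAbs : Int))).sum := by
    rw [outer_fold, pyRange32, List.map_map]
    have h1 : ((List.range 32).map ((fun k => (numbers.map (bitc k.toNat)).sum) ∘ Int.ofNat))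
        = (List.range 32).map (fun k => (numbers.map (bitc k)).sum) := rfl
    rw [h1, sum_swap_list (List.range 32) numbers (fun k n => bitc k n)]
    have h2 : ∀ num ∈ numbers,
        ((List.range 32).map (fun k => bitc k num)).sum
          = wgt num * (binOnes num.natAbs : Int) := fun num hm => sum_bitc num (hbound num hm)
    rw [List.map_congr_left h2]
    ring
  rw [hB]
  have hA := a_fold numbers 0 0
  set p := numbers.foldl
      (fun (s : Int × Int) num =>
        if num = 0 then s
        else if PySem.Int.band num 1 ≠ 0 then (s.1 + strengthA num, s.2)
        else (s.1, s.2 + strengthA num)) ((0 : Int), (0 : Int)) with hp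
  set S := (numbers.map (fun num => wgt num * (binOnes num.natAbs : Int))).sum with hS
  rw [show (0:Int) - 0 + S = S by ring] at hA
  by_cases h1 : p.1 = p.2
  · rw [if_pos h1, if_neg (by omega), if_neg (by omega)]
  · by_cases h2 : p.1 > p.2
    · rw [if_neg h1, if_pos h2, if_pos (by omega)]
    · rw [if_neg h1, if_neg h2, if_neg (by omega), if_pos (by omega)]
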